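-- pv_equiv track=rewrite | github.com/ArthurLabaki/Materias_UFU | IA/Trab1/Códigos/profundidade_iterativa.py | calculaPontuacaoIndividualRainha
-- ===== SOURCE A (Python) =====
-- def calculaPontuacaoIndividualRainha(posicaoRainha, tabuleiro, n):
--     linhaRainhaChecada = posicaoRainha[0]
--     colunaRainhaChecada = posicaoRainha[1]
--
--     conflitos = []
--
--     # Checando movimento vertical
--     for linha in range(0, n):
--         pontuacao = 0
--         elementoNaPosicao = tabuleiro[linha][colunaRainhaChecada]
--         if elementoNaPosicao != 0 and elementoNaPosicao != tabuleiro[linhaRainhaChecada][colunaRainhaChecada]: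
--             conflitos = conflitos + \
--                 [[tabuleiro[linhaRainhaChecada][colunaRainhaChecada], elementoNaPosicao]]
--             pontuacao = pontuacao + 1
--
--     # Checando movimento horizontal
--     for coluna in range(0, n):
--         pontuacao = 0
--         elementoNaPosicao = tabuleiro[linhaRainhaChecada][coluna]
--         if elementoNaPosicao != 0 and elementoNaPosicao != tabuleiro[linhaRainhaChecada][colunaRainhaChecada]:
--             conflitos = conflitos + \
--                 [[tabuleiro[linhaRainhaChecada][colunaRainhaChecada], elementoNaPosicao]]
--             pontuacao = pontuacao + 1
--
--     # Checando movimento diagonal esquerda direita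
--     l = linhaRainhaChecada
--     c = colunaRainhaChecada
--     while l > 0 and c > 0:
--         l = l-1
--         c = c-1
--     while l < n and c < n:
--         pontuacao = 0
--         elementoNaPosicao = tabuleiro[l][c]
--         if elementoNaPosicao != 0 and elementoNaPosicao != tabuleiro[linhaRainhaChecada][colunaRainhaChecada]:
--             conflitos = conflitos + \
--                 [[tabuleiro[linhaRainhaChecada][colunaRainhaChecada], elementoNaPosicao]]
--             pontuacao = pontuacao + 1
--         l = l+1
--         c = c+1
--
--     # Checando movimento diagonal direita esquerda
--     l = linhaRainhaChecada
--     c = colunaRainhaChecada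
--     while l > 0 and c < n-1:
--         l = l-1
--         c = c+1
--     while l < n and c > -1:
--         pontuacao = 0
--         elementoNaPosicao = tabuleiro[l][c]
--         if elementoNaPosicao != 0 and elementoNaPosicao != tabuleiro[linhaRainhaChecada][colunaRainhaChecada]:
--             conflitos = conflitos + \
--                 [[tabuleiro[linhaRainhaChecada][colunaRainhaChecada], elementoNaPosicao]]
--             pontuacao = pontuacao + 1
--         l = l+1
--         c = c-1
--
--     return conflitos
-- ===== SOURCE B (Python) =====
-- def calculaPontuacaoIndividualRainha(posicaoRainha, tabuleiro, n):
--     l0, c0 = posicaoRainha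
--     # One pass over the whole n x n board: classify each conflicting cell by the
--     # line it shares with the queen (column / row / main diagonal / anti-diagonal)
--     # into four buckets, then concatenate the buckets in A's reporting order.
--     col, row, diag, anti = [], [], [], []
--     for r in range(n):
--         for c in range(n):
--             q = tabuleiro[l0][c0]
--             v = tabuleiro[r][c]
--             if v == 0 or v == q:
--                 continue
--             if c == c0:
--                 col.append([q, v])
--             elif r == l0:
--                 row.append([q, v])
--             elif r - c == l0 - c0:
--                 diag.append([q, v])
--             elif r + c == l0 + c0:
--                 anti.append([q, v])
--     return col + row + diag + anti
-- ===== Notes on version B (the rewrite author's own statement) =====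
-- stated objective: alternative
-- what changed: B abandons A's four line walks (column scan, row scan, two while-loop diagonal walks with backup loops to find the start): it makes a single row-major pass over the whole n x n board, classifies each conflicting cell by which line it shares with the queen into four buckets (column/row/main diagonal/anti-diagonal), and concatenates the buckets, which reproduces A's reporting order because each non-queen cell lies on at most one of the four lines.
-- outside the precondition, e.g. on calculaPontuacaoIndividualRainha((1, 1), [[0, 1, 2], [2, 2, 2], [0, 2, 1]], 1): A returns [[2, 1]], B returns []
import Mathlib
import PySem

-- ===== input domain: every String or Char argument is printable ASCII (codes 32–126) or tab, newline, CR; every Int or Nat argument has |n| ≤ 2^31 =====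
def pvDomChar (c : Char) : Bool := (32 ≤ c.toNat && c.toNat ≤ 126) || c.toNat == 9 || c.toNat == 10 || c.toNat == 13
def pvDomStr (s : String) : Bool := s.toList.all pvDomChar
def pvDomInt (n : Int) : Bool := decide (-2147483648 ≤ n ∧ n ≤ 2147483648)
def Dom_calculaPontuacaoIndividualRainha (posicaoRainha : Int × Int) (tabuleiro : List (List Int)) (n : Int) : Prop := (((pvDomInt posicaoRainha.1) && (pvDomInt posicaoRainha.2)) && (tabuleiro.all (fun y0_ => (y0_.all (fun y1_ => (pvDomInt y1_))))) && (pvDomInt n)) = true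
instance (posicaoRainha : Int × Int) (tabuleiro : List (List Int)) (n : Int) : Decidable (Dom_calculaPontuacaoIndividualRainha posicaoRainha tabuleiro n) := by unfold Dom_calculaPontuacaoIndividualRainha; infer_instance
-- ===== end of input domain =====

-- B replaces A's four line walks by ONE row-major pass over the whole board that classifies
-- each conflicting cell, by the line it shares with the queen, into four buckets
-- (column / row / main diagonal / anti-diagonal) and concatenates them; objective: alternative.

-- ===== PORT A =====
-- tabuleiro[i][j] (Python indexing; inside Pre_ all indices are in range, so the default is never used)
def pvGet2 (t : List (List Int)) (i j : Int) : Int :=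
  (PySem.List.pyGet? ((PySem.List.pyGet? t i).getD []) j).getD 0

-- while l > 0 and c > 0: l -= 1; c -= 1
def pvBackLL (l c : Int) : Int × Int :=
  if l > 0 ∧ c > 0 then pvBackLL (l - 1) (c - 1) else (l, c)
termination_by l.toNat
decreasing_by omega

-- while l > 0 and c < n-1: l -= 1; c += 1
def pvBackLR (n l c : Int) : Int × Int :=
  if l > 0 ∧ c < n - 1 then pvBackLR n (l - 1) (c + 1) else (l, c)
termination_by l.toNat
decreasing_by omega

-- while l < n and c < n: check cell; l += 1; c += 1
def pvDiag1 (tab : List (List Int)) (n lr cr l c : Int) (acc : List (List Int)) : List (List Int) :=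
  if l < n ∧ c < n then
    let e := pvGet2 tab l c
    let acc' := if e ≠ 0 ∧ e ≠ pvGet2 tab lr cr then acc ++ [[pvGet2 tab lr cr, e]] else acc
    pvDiag1 tab n lr cr (l + 1) (c + 1) acc'
  else acc
termination_by (n - l).toNat
decreasing_by omega

-- while l < n and c > -1: check cell; l += 1; c -= 1
def pvDiag2 (tab : List (List Int)) (n lr cr l c : Int) (acc : List (List Int)) : List (List Int) :=
  if l < n ∧ c > -1 then
    let e := pvGet2 tab l c
    let acc' := if e ≠ 0 ∧ e ≠ pvGet2 tab lr cr then acc ++ [[pvGet2 tab lr cr, e]] else acc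
    pvDiag2 tab n lr cr (l + 1) (c - 1) acc'
  else acc
termination_by (n - l).toNat
decreasing_by omega

def calculaPontuacaoIndividualRainha (posicaoRainha : Int × Int) (tabuleiro : List (List Int)) (n : Int) : List (List Int) :=
  let lr := posicaoRainha.1
  let cr := posicaoRainha.2
  let conf1 := (PySem.List.pyRange 0 n 1).foldl (fun acc linha =>
    let e := pvGet2 tabuleiro linha cr
    if e ≠ 0 ∧ e ≠ pvGet2 tabuleiro lr cr then acc ++ [[pvGet2 tabuleiro lr cr, e]] else acc) []
  let conf2 := (PySem.List.pyRange 0 n 1).foldl (fun acc coluna =>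
    let e := pvGet2 tabuleiro lr coluna
    if e ≠ 0 ∧ e ≠ pvGet2 tabuleiro lr cr then acc ++ [[pvGet2 tabuleiro lr cr, e]] else acc) conf1
  let s1 := pvBackLL lr cr
  let conf3 := pvDiag1 tabuleiro n lr cr s1.1 s1.2 conf2
  let s2 := pvBackLR n lr cr
  pvDiag2 tabuleiro n lr cr s2.1 s2.2 conf3

-- ===== PORT B =====
-- one row-major pass over the n×n board; state = the four buckets (col, row, diag, anti)
def calculaPontuacaoIndividualRainha_alt (posicaoRainha : Int × Int) (tabuleiro : List (List Int)) (n : Int) : List (List Int) :=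
  let l0 := posicaoRainha.1
  let c0 := posicaoRainha.2
  let st := (PySem.List.pyRange 0 n 1).foldl (fun st r =>
    (PySem.List.pyRange 0 n 1).foldl (fun st c =>
      let q := pvGet2 tabuleiro l0 c0
      let v := pvGet2 tabuleiro r c
      if v = 0 ∨ v = q then st
      else if c = c0 then (st.1 ++ [[q, v]], st.2.1, st.2.2.1, st.2.2.2)
      else if r = l0 then (st.1, st.2.1 ++ [[q, v]], st.2.2.1, st.2.2.2)
      else if r - c = l0 - c0 then (st.1, st.2.1, st.2.2.1 ++ [[q, v]], st.2.2.2)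
      else if r + c = l0 + c0 then (st.1, st.2.1, st.2.2.1, st.2.2.2 ++ [[q, v]])
      else st) st)
    (([], [], [], []) : List (List Int) × List (List Int) × List (List Int) × List (List Int))
  st.1 ++ st.2.1 ++ st.2.2.1 ++ st.2.2.2

-- ===== PRECONDITION & SPEC =====
-- Pre_: either the degenerate case n ≤ 0 in which no board cell is ever scanned (both
-- diagonal start points — the back-up offsets are max 0 (min …) — already fail their loop
-- bound, so A touches nothing and returns []), or the natural n×n-board domain: n ≥ 1, the
-- queen's position in range, and the first n rows with at least n entries (exactly the cells
-- A touches), so no IndexError.  Pre_ excludes out-of-range queen positions on which A still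
-- returns: there A's value comes from Python's negative-index wraparound, an accident of A's
-- indexing, and B's single-board scan has no reason to reproduce it.
def Pre_calculaPontuacaoIndividualRainha (posicaoRainha : Int × Int) (tabuleiro : List (List Int)) (n : Int) : Prop :=
  (n ≤ 0 ∧
    (n ≤ posicaoRainha.1 - max 0 (min posicaoRainha.1 posicaoRainha.2) ∨
     n ≤ posicaoRainha.2 - max 0 (min posicaoRainha.1 posicaoRainha.2)) ∧
    (n ≤ posicaoRainha.1 - max 0 (min posicaoRainha.1 (n - 1 - posicaoRainha.2)) ∨
     posicaoRainha.2 + max 0 (min posicaoRainha.1 (n - 1 - posicaoRainha.2)) ≤ -1)) ∨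
  (1 ≤ n ∧ n ≤ (tabuleiro.length : Int) ∧ (∀ row ∈ tabuleiro.take n.toNat, n ≤ (row.length : Int)) ∧
   0 ≤ posicaoRainha.1 ∧ posicaoRainha.1 < n ∧ 0 ≤ posicaoRainha.2 ∧ posicaoRainha.2 < n)
instance (posicaoRainha : Int × Int) (tabuleiro : List (List Int)) (n : Int) : Decidable (Pre_calculaPontuacaoIndividualRainha posicaoRainha tabuleiro n) := by unfold Pre_calculaPontuacaoIndividualRainha; infer_instance

def pvWitness_calculaPontuacaoIndividualRainha : (Int × Int) × List (List Int) × Int :=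
  ((1, 0), [[0, 2, 0], [1, 0, 0], [0, 0, 3]], 3)

def Spec_calculaPontuacaoIndividualRainha (posicaoRainha : Int × Int) (tabuleiro : List (List Int)) (n : Int) (out : List (List Int)) : Prop := out = calculaPontuacaoIndividualRainha_alt posicaoRainha tabuleiro n
instance (posicaoRainha : Int × Int) (tabuleiro : List (List Int)) (n : Int) (out : List (List Int)) : Decidable (Spec_calculaPontuacaoIndividualRainha posicaoRainha tabuleiro n out) := by unfold Spec_calculaPontuacaoIndividualRainha; infer_instance

-- ===== CLAIM (what is proved, stated in full; the proofs are below) =====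
def Claim_equal_calculaPontuacaoIndividualRainha : Prop := ∀ (posicaoRainha : Int × Int) (tabuleiro : List (List Int)) (n : Int), Dom_calculaPontuacaoIndividualRainha posicaoRainha tabuleiro n → Pre_calculaPontuacaoIndividualRainha posicaoRainha tabuleiro n → Spec_calculaPontuacaoIndividualRainha posicaoRainha tabuleiro n (calculaPontuacaoIndividualRainha posicaoRainha tabuleiro n)

-- ===== LEMMAS AND PROOFS =====

-- the single-cell check both programs perform
def pvF (tab : List (List Int)) (lr cr : Int) (p : Int × Int) : List (List Int) :=
  if pvGet2 tab p.1 p.2 ≠ 0 ∧ pvGet2 tab p.1 p.2 ≠ pvGet2 tab lr cr then [[pvGet2 tab lr cr, pvGet2 tab p.1 p.2]] else []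

-- the per-bucket contribution of one scanned cell of B (the elif chain, branch by branch)
def pvB1 (tab : List (List Int)) (l0 c0 r c : Int) : List (List Int) :=
  if ¬(pvGet2 tab r c = 0 ∨ pvGet2 tab r c = pvGet2 tab l0 c0) ∧ c = c0 then [[pvGet2 tab l0 c0, pvGet2 tab r c]] else []
def pvB2 (tab : List (List Int)) (l0 c0 r c : Int) : List (List Int) :=
  if ¬(pvGet2 tab r c = 0 ∨ pvGet2 tab r c = pvGet2 tab l0 c0) ∧ c ≠ c0 ∧ r = l0 then [[pvGet2 tab l0 c0, pvGet2 tab r c]] else []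
def pvB3 (tab : List (List Int)) (l0 c0 r c : Int) : List (List Int) :=
  if ¬(pvGet2 tab r c = 0 ∨ pvGet2 tab r c = pvGet2 tab l0 c0) ∧ c ≠ c0 ∧ r ≠ l0 ∧ r - c = l0 - c0 then [[pvGet2 tab l0 c0, pvGet2 tab r c]] else []
def pvB4 (tab : List (List Int)) (l0 c0 r c : Int) : List (List Int) :=
  if ¬(pvGet2 tab r c = 0 ∨ pvGet2 tab r c = pvGet2 tab l0 c0) ∧ c ≠ c0 ∧ r ≠ l0 ∧ r - c ≠ l0 - c0 ∧ r + c = l0 + c0 then [[pvGet2 tab l0 c0, pvGet2 tab r c]] else []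

theorem pvFoldSeg (tab : List (List Int)) (lr cr : Int) (g : Int → Int × Int) (xs : List Int) (init : List (List Int)) :
    xs.foldl (fun acc x =>
      let e := pvGet2 tab (g x).1 (g x).2
      if e ≠ 0 ∧ e ≠ pvGet2 tab lr cr then acc ++ [[pvGet2 tab lr cr, e]] else acc) init
    = init ++ (xs.map g).flatMap (pvF tab lr cr) := by
  induction xs generalizing init with
  | nil => simp
  | cons x xs ih => simp [List.foldl_cons, ih, pvF]; split <;> simp

-- coordinates of the main diagonal from (l,c) while both < n (proof-side description of A's walk)
def pvDiagCells1 (n l c : Int) : List (Int × Int) :=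
  if l < n ∧ c < n then (l, c) :: pvDiagCells1 n (l + 1) (c + 1) else []
termination_by (n - l).toNat
decreasing_by omega

-- coordinates of the anti-diagonal from (l,c) while l < n and c > -1
def pvDiagCells2 (n l c : Int) : List (Int × Int) :=
  if l < n ∧ c > -1 then (l, c) :: pvDiagCells2 n (l + 1) (c - 1) else []
termination_by (n - l).toNat
decreasing_by omega

theorem pvDiag1_eq (tab : List (List Int)) (lr cr n l c : Int) (acc : List (List Int)) :
    pvDiag1 tab n lr cr l c acc = acc ++ (pvDiagCells1 n l c).flatMap (pvF tab lr cr) := by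
  fun_induction pvDiagCells1 n l c generalizing acc with
  | case1 l c h ih =>
      rw [pvDiag1, if_pos h]
      simp only [List.flatMap_cons, ih, pvF]
      split <;> simp
  | case2 l c h => rw [pvDiag1, if_neg h]; simp

theorem pvDiag2_eq (tab : List (List Int)) (lr cr n l c : Int) (acc : List (List Int)) :
    pvDiag2 tab n lr cr l c acc = acc ++ (pvDiagCells2 n l c).flatMap (pvF tab lr cr) := by
  fun_induction pvDiagCells2 n l c generalizing acc with
  | case1 l c h ih =>
      rw [pvDiag2, if_pos h]
      simp only [List.flatMap_cons, ih, pvF]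
      split <;> simp
  | case2 l c h => rw [pvDiag2, if_neg h]; simp

theorem pvBackLL_eq (l c : Int) :
    pvBackLL l c = (l - max 0 (min l c), c - max 0 (min l c)) := by
  fun_induction pvBackLL l c with
  | case1 l c h ih =>
      rw [ih]
      have : max 0 (min (l - 1) (c - 1)) = max 0 (min l c) - 1 := by omega
      rw [this]; ring_nf
  | case2 l c h =>
      have : max 0 (min l c) = 0 := by omega
      simp [this]

theorem pvBackLR_eq (n l c : Int) :
    pvBackLR n l c = (l - max 0 (min l (n - 1 - c)), c + max 0 (min l (n - 1 - c))) := by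
  fun_induction pvBackLR n l c with
  | case1 l c h ih =>
      rw [ih]
      have : max 0 (min (l - 1) (n - 1 - (c + 1))) = max 0 (min l (n - 1 - c)) - 1 := by omega
      rw [this]; ring_nf
  | case2 l c h =>
      have : max 0 (min l (n - 1 - c)) = 0 := by omega
      simp [this]

theorem pvRange_nil (n : Int) (h : n ≤ 0) : PySem.List.pyRange 0 n 1 = [] := by
  simp [PySem.List.pyRange]; omega

-- B's inner loop over one row appends each cell's contribution to its bucket
theorem pvInner_eq (tab : List (List Int)) (l0 c0 r : Int) (cs : List Int)
    (st : List (List Int) × List (List Int) × List (List Int) × List (List Int)) :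
    cs.foldl (fun st c =>
      let q := pvGet2 tab l0 c0
      let v := pvGet2 tab r c
      if v = 0 ∨ v = q then st
      else if c = c0 then (st.1 ++ [[q, v]], st.2.1, st.2.2.1, st.2.2.2)
      else if r = l0 then (st.1, st.2.1 ++ [[q, v]], st.2.2.1, st.2.2.2)
      else if r - c = l0 - c0 then (st.1, st.2.1, st.2.2.1 ++ [[q, v]], st.2.2.2)
      else if r + c = l0 + c0 then (st.1, st.2.1, st.2.2.1, st.2.2.2 ++ [[q, v]])
      else st) st
    = (st.1 ++ cs.flatMap (pvB1 tab l0 c0 r), st.2.1 ++ cs.flatMap (pvB2 tab l0 c0 r),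
       st.2.2.1 ++ cs.flatMap (pvB3 tab l0 c0 r), st.2.2.2 ++ cs.flatMap (pvB4 tab l0 c0 r)) := by
  induction cs generalizing st with
  | nil => simp
  | cons c cs ih =>
      obtain ⟨a, b, c2, d⟩ := st
      simp only [List.foldl_cons, List.flatMap_cons]
      rw [ih]
      by_cases h1 : pvGet2 tab r c = 0 ∨ pvGet2 tab r c = pvGet2 tab l0 c0
      · simp [h1, pvB1, pvB2, pvB3, pvB4]
      · by_cases h2 : c = c0
        · subst h2; simp [h1, pvB1, pvB2, pvB3, pvB4]
        · by_cases h3 : r = l0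
          · subst h3; simp [h1, h2, pvB1, pvB2, pvB3, pvB4]
          · by_cases h4 : r - c = l0 - c0
            · simp [h1, h2, h3, h4, pvB1, pvB2, pvB3, pvB4]
            · by_cases h5 : r + c = l0 + c0 <;>
                simp [h1, h2, h3, h4, h5, pvB1, pvB2, pvB3, pvB4]

theorem pvOuter_eq (tab : List (List Int)) (l0 c0 n : Int) (rs : List Int)
    (st : List (List Int) × List (List Int) × List (List Int) × List (List Int)) :
    rs.foldl (fun st r =>
      (PySem.List.pyRange 0 n 1).foldl (fun st c =>
        let q := pvGet2 tab l0 c0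
        let v := pvGet2 tab r c
        if v = 0 ∨ v = q then st
        else if c = c0 then (st.1 ++ [[q, v]], st.2.1, st.2.2.1, st.2.2.2)
        else if r = l0 then (st.1, st.2.1 ++ [[q, v]], st.2.2.1, st.2.2.2)
        else if r - c = l0 - c0 then (st.1, st.2.1, st.2.2.1 ++ [[q, v]], st.2.2.2)
        else if r + c = l0 + c0 then (st.1, st.2.1, st.2.2.1, st.2.2.2 ++ [[q, v]])
        else st) st) st
    = (st.1 ++ rs.flatMap (fun r => (PySem.List.pyRange 0 n 1).flatMap (pvB1 tab l0 c0 r)),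
       st.2.1 ++ rs.flatMap (fun r => (PySem.List.pyRange 0 n 1).flatMap (pvB2 tab l0 c0 r)),
       st.2.2.1 ++ rs.flatMap (fun r => (PySem.List.pyRange 0 n 1).flatMap (pvB3 tab l0 c0 r)),
       st.2.2.2 ++ rs.flatMap (fun r => (PySem.List.pyRange 0 n 1).flatMap (pvB4 tab l0 c0 r))) := by
  induction rs generalizing st with
  | nil => simp
  | cons r rs ih =>
      simp only [List.foldl_cons, List.flatMap_cons]
      rw [pvInner_eq, ih]
      simp [List.append_assoc]

-- filter a unit-step range by a subinterval: only the clipped range survives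
theorem pvRF (g : Int → List (List Int)) (lo hi b a : Int) :
    (PySem.List.pyRange a b 1).flatMap (fun x => if lo ≤ x ∧ x < hi then g x else [])
      = (PySem.List.pyRange (max a lo) (min b hi) 1).flatMap g := by
  by_cases hab : b ≤ a
  · rw [PySem.List.pyRange_one_eq_nil hab, PySem.List.pyRange_one_eq_nil (by omega)]
    simp
  · have hab : a < b := lt_of_not_ge hab
    rw [PySem.List.pyRange_one_cons hab]
    simp only [List.flatMap_cons]
    rw [pvRF g lo hi b (a + 1)]
    by_cases h : lo ≤ a ∧ a < hi
    · rw [if_pos h, show max a lo = a by omega,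
          PySem.List.pyRange_one_cons (show a < min b hi by omega),
          show max (a + 1) lo = a + 1 by omega]
      simp
    · rw [if_neg h, List.nil_append]
      by_cases h2 : a < lo
      · rw [show max (a + 1) lo = max a lo by omega]
      · rw [PySem.List.pyRange_one_eq_nil (by omega), PySem.List.pyRange_one_eq_nil (by omega)]
termination_by (b - a).toNat
decreasing_by omega

theorem pvG1_eq (tab : List (List Int)) (l0 c0 n : Int) (h0 : 0 ≤ c0) (h1 : c0 < n) :
    (PySem.List.pyRange 0 n 1).flatMap (fun r => (PySem.List.pyRange 0 n 1).flatMap (pvB1 tab l0 c0 r))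
      = ((PySem.List.pyRange 0 n 1).map (fun r => (r, c0))).flatMap (pvF tab l0 c0) := by
  rw [List.flatMap_map]
  congr 1
  funext r
  have : (pvB1 tab l0 c0 r) = fun c => if c0 ≤ c ∧ c < c0 + 1 then pvF tab l0 c0 (r, c) else [] := by
    funext c
    simp only [pvB1, pvF]
    split_ifs <;> first | rfl | omega
  rw [this, pvRF, show max 0 c0 = c0 by omega, show min n (c0 + 1) = c0 + 1 by omega,
      PySem.List.pyRange_one_singleton]
  simp

theorem pvG2_eq (tab : List (List Int)) (l0 c0 n : Int) (h0 : 0 ≤ l0) (h1 : l0 < n) :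
    (PySem.List.pyRange 0 n 1).flatMap (fun r => (PySem.List.pyRange 0 n 1).flatMap (pvB2 tab l0 c0 r))
      = ((PySem.List.pyRange 0 n 1).map (fun c => (l0, c))).flatMap (pvF tab l0 c0) := by
  rw [List.flatMap_map]
  have hout : (fun r => (PySem.List.pyRange 0 n 1).flatMap (pvB2 tab l0 c0 r))
      = fun r => if l0 ≤ r ∧ r < l0 + 1 then (PySem.List.pyRange 0 n 1).flatMap (pvB2 tab l0 c0 r) else [] := by
    funext r
    by_cases hr : r = l0
    · rw [if_pos (by omega)]
    · rw [if_neg (by omega), List.flatMap_eq_nil_iff.2]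
      intro c _
      simp only [pvB2]
      rw [if_neg (by tauto)]
  rw [hout, pvRF, show max 0 l0 = l0 by omega, show min n (l0 + 1) = l0 + 1 by omega,
      PySem.List.pyRange_one_singleton]
  simp only [List.flatMap_cons, List.flatMap_nil, List.append_nil]
  congr 1
  funext c
  simp only [pvB2, pvF]
  split_ifs <;> first | rfl | omega | tauto

theorem pvDiagCells1_eq (n l c : Int) :
    pvDiagCells1 n l c = (PySem.List.pyRange l (min n (n + (l - c))) 1).map (fun r => (r, r - (l - c))) := by
  fun_induction pvDiagCells1 n l c with
  | case1 l c h ih =>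
      rw [PySem.List.pyRange_one_cons (by omega)]
      simp only [List.map_cons]
      have hd : l + 1 - (c + 1) = l - c := by ring
      rw [hd] at ih
      rw [ih]
      congr 2
      omega
  | case2 l c h =>
      rw [PySem.List.pyRange_one_eq_nil (by omega)]
      simp

theorem pvDiagCells2_eq (n l c : Int) :
    pvDiagCells2 n l c = (PySem.List.pyRange l (min n ((l + c) + 1)) 1).map (fun r => (r, (l + c) - r)) := by
  fun_induction pvDiagCells2 n l c with
  | case1 l c h ih =>
      rw [PySem.List.pyRange_one_cons (by omega)]
      simp only [List.map_cons]
      have hd : l + 1 + (c - 1) = l + c := by ring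
      rw [hd] at ih
      rw [ih]
      congr 2
      omega
  | case2 l c h =>
      rw [PySem.List.pyRange_one_eq_nil (by omega)]
      simp

theorem pvB3_diag (tab : List (List Int)) (l0 c0 r c : Int) (h : r - c = l0 - c0) :
    pvB3 tab l0 c0 r c = pvF tab l0 c0 (r, c) := by
  by_cases hq : r = l0
  · have hcc : c = c0 := by omega
    subst hq; subst hcc
    simp [pvB3, pvF]
  · have hcc : c ≠ c0 := by omega
    simp only [pvB3, pvF]
    split_ifs <;> first | rfl | tauto

theorem pvB4_anti (tab : List (List Int)) (l0 c0 r c : Int) (h : r + c = l0 + c0) :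
    pvB4 tab l0 c0 r c = pvF tab l0 c0 (r, c) := by
  by_cases hq : r = l0
  · have hcc : c = c0 := by omega
    subst hq; subst hcc
    simp [pvB4, pvF]
  · have hcc : c ≠ c0 := by omega
    have hdd : r - c ≠ l0 - c0 := by omega
    simp only [pvB4, pvF]
    split_ifs <;> first | rfl | tauto

theorem pvG3_eq (tab : List (List Int)) (l0 c0 n : Int)
    (ha : 0 ≤ l0) (hb : l0 < n) (_hc : 0 ≤ c0) (_hd : c0 < n) :
    (PySem.List.pyRange 0 n 1).flatMap (fun r => (PySem.List.pyRange 0 n 1).flatMap (pvB3 tab l0 c0 r))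
      = (pvDiagCells1 n (l0 - min l0 c0) (c0 - min l0 c0)).flatMap (pvF tab l0 c0) := by
  have hout : (fun r => (PySem.List.pyRange 0 n 1).flatMap (pvB3 tab l0 c0 r))
      = fun r => if (l0 - c0) ≤ r ∧ r < n + (l0 - c0) then pvF tab l0 c0 (r, r - (l0 - c0)) else [] := by
    funext r
    have hin : (pvB3 tab l0 c0 r) = fun c => if (r - (l0 - c0)) ≤ c ∧ c < (r - (l0 - c0)) + 1 then pvB3 tab l0 c0 r c else [] := by
      funext c
      by_cases hc' : c = r - (l0 - c0)
      · rw [if_pos (by omega)]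
      · rw [if_neg (by omega)]
        simp only [pvB3]
        rw [if_neg (by intro h; omega)]
    rw [hin, pvRF]
    by_cases hr : (l0 - c0) ≤ r ∧ r < n + (l0 - c0)
    · rw [if_pos hr, show max 0 (r - (l0 - c0)) = r - (l0 - c0) by omega,
          show min n (r - (l0 - c0) + 1) = r - (l0 - c0) + 1 by omega,
          PySem.List.pyRange_one_singleton]
      simp only [List.flatMap_cons, List.flatMap_nil, List.append_nil]
      rw [pvB3_diag tab l0 c0 r _ (by ring)]
    · rw [if_neg hr]
      by_cases h2 : r - (l0 - c0) < 0
      · rw [PySem.List.pyRange_one_eq_nil (by omega)]; rfl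
      · rw [PySem.List.pyRange_one_eq_nil (by omega)]; rfl
  rw [hout, pvRF, pvDiagCells1_eq,
      show (l0 - min l0 c0) - (c0 - min l0 c0) = l0 - c0 by ring,
      show max 0 (l0 - c0) = l0 - min l0 c0 by omega,
      List.flatMap_map]

theorem pvG4_eq (tab : List (List Int)) (l0 c0 n : Int)
    (ha : 0 ≤ l0) (hb : l0 < n) (_hc : 0 ≤ c0) (_hd : c0 < n) :
    (PySem.List.pyRange 0 n 1).flatMap (fun r => (PySem.List.pyRange 0 n 1).flatMap (pvB4 tab l0 c0 r))
      = (pvDiagCells2 n (l0 - min l0 (n - 1 - c0)) (c0 + min l0 (n - 1 - c0))).flatMap (pvF tab l0 c0) := by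
  have hout : (fun r => (PySem.List.pyRange 0 n 1).flatMap (pvB4 tab l0 c0 r))
      = fun r => if (l0 + c0) - n + 1 ≤ r ∧ r < (l0 + c0) + 1 then pvF tab l0 c0 (r, (l0 + c0) - r) else [] := by
    funext r
    have hin : (pvB4 tab l0 c0 r) = fun c => if ((l0 + c0) - r) ≤ c ∧ c < ((l0 + c0) - r) + 1 then pvB4 tab l0 c0 r c else [] := by
      funext c
      by_cases hc' : c = (l0 + c0) - r
      · rw [if_pos (by omega)]
      · rw [if_neg (by omega)]
        simp only [pvB4]
        rw [if_neg (by intro h; omega)]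
    rw [hin, pvRF]
    by_cases hr : (l0 + c0) - n + 1 ≤ r ∧ r < (l0 + c0) + 1
    · rw [if_pos hr, show max 0 ((l0 + c0) - r) = (l0 + c0) - r by omega,
          show min n ((l0 + c0) - r + 1) = (l0 + c0) - r + 1 by omega,
          PySem.List.pyRange_one_singleton]
      simp only [List.flatMap_cons, List.flatMap_nil, List.append_nil]
      rw [pvB4_anti tab l0 c0 r _ (by ring)]
    · rw [if_neg hr]
      by_cases h2 : (l0 + c0) - r < 0
      · rw [PySem.List.pyRange_one_eq_nil (by omega)]; rfl
      · rw [PySem.List.pyRange_one_eq_nil (by omega)]; rfl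
  rw [hout, pvRF, pvDiagCells2_eq,
      show (l0 - min l0 (n - 1 - c0)) + (c0 + min l0 (n - 1 - c0)) = l0 + c0 by ring,
      show max 0 ((l0 + c0) - n + 1) = l0 - min l0 (n - 1 - c0) by omega,
      List.flatMap_map]

-- ===== VERDICT =====
theorem calculaPontuacaoIndividualRainha_spec : Claim_equal_calculaPontuacaoIndividualRainha := by
  intro pos tab n _ hPre
  show _ = _
  unfold calculaPontuacaoIndividualRainha calculaPontuacaoIndividualRainha_alt
  rcases hPre with ⟨hn, hd1, hd2⟩ | ⟨h1, _, _, hl0, hln, hc0, hcn⟩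
  · -- degenerate n ≤ 0: nothing is scanned on either side
    simp only [pvRange_nil n hn, List.foldl_nil, List.nil_append,
               pvBackLL_eq, pvBackLR_eq]
    rw [pvDiag1, if_neg (by omega)]
    rw [pvDiag2, if_neg (by omega)]
  · -- main branch: each of B's four buckets is exactly one of A's four scan segments
    have e1 : max 0 (min pos.1 pos.2) = min pos.1 pos.2 := by omega
    have e2 : max 0 (min pos.1 (n - 1 - pos.2)) = min pos.1 (n - 1 - pos.2) := by omega
    simp only [pvFoldSeg tab pos.1 pos.2 (fun r => (r, pos.2)),
               pvFoldSeg tab pos.1 pos.2 (fun c => (pos.1, c)),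
               pvDiag1_eq, pvDiag2_eq, pvBackLL_eq, pvBackLR_eq, e1, e2, List.nil_append]
    rw [pvOuter_eq]
    simp only [pvG1_eq tab pos.1 pos.2 n hc0 hcn, pvG2_eq tab pos.1 pos.2 n hl0 hln,
               pvG3_eq tab pos.1 pos.2 n hl0 hln hc0 hcn,
               pvG4_eq tab pos.1 pos.2 n hl0 hln hc0 hcn, List.nil_append]
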